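-- pv_equiv track=rewrite | github.com/carlosdcastillo/alpaca-assist | chat_tab_streaming_core.py | _contains_actual_newline
-- ===== SOURCE A (Python) =====
-- def _contains_actual_newline(content: str) -> bool:
--     """
--     Check if content contains actual newlines (not escaped ones like \\n).
--
--     Args:
--         content: The content to check
--
--     Returns:
--         True if content contains actual newline characters, False otherwise
--     """
--     if "\n" not in content:
--         return False
--     pos = 0
--     while pos < len(content):
--         newline_pos = content.find("\n", pos)
--         if newline_pos == -1:
--             break
--         if newline_pos == 0:
--             return True
--         backslash_count = 0
--         check_pos = newline_pos - 1
--         while check_pos >= 0 and content[check_pos] == "\\":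
--             backslash_count += 1
--             check_pos -= 1
--         if backslash_count % 2 == 0:
--             return True
--         pos = newline_pos + 1
--     return False
-- ===== SOURCE B (Python) =====
-- def _contains_actual_newline(content: str) -> bool:
--     backslashes = 0
--     for ch in content:
--         if ch == "\\":
--             backslashes += 1
--         elif ch == "\n":
--             if backslashes % 2 == 0:
--                 return True
--             backslashes = 0
--         else:
--             backslashes = 0
--     return False
-- ===== Notes on version B (the rewrite author's own statement) =====
-- stated objective: simpler
-- what changed: Replaces A's repeated find-next-newline calls each followed by a backward backslash scan with one left-to-right pass maintaining a count of consecutive trailing backslashes.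
import Mathlib
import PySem

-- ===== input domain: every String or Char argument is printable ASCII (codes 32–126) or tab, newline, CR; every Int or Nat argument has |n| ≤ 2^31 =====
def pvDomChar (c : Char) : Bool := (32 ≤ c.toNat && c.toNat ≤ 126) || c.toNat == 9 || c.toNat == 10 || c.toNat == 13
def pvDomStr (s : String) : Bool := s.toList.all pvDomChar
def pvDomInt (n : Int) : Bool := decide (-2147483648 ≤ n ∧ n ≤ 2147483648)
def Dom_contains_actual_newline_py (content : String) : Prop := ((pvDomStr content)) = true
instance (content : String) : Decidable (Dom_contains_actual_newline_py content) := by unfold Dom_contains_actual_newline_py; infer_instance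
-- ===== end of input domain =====

-- B replaces A's repeated find("\n", pos) plus backward backslash scan with a single
-- left-to-right pass keeping a count of consecutive trailing backslashes (objective: simpler).

-- ===== PORT A =====
-- the inner backward while-loop; argument j encodes check_pos + 1 (j = 0 ⇔ check_pos < 0),
-- called with j = newline_pos
def pvCountBack (cs : List Char) : Nat → Nat
  | 0 => 0
  | p + 1 => if PySem.List.pyGetD cs (p : Int) ' ' = '\\' then pvCountBack cs p + 1 else 0

-- the outer while-loop of A; fuel bounds the number of iterations (pos strictly grows,
-- so cs.length + 1 iterations always suffice)
def pvALoop (cs : List Char) (pos : Nat) : Nat → Bool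
  | 0 => false
  | fuel + 1 =>
    if pos < cs.length then
      let np := PySem.Chars.findFrom cs ['\n'] (pos : Int) none
      if np = -1 then false
      else if np = 0 then true
      else if pvCountBack cs np.toNat % 2 = 0 then true
      else pvALoop cs (np.toNat + 1) fuel
    else false

def contains_actual_newline_py (content : String) : Bool :=
  if !PySem.Str.isIn "\n" content then false
  else pvALoop content.toList 0 (content.toList.length + 1)

-- ===== PORT B =====
def pvBScan : List Char → Nat → Bool
  | [], _ => false
  | c :: rest, k =>
    if c = '\\' then pvBScan rest (k + 1)
    else if c = '\n' then (if k % 2 = 0 then true else pvBScan rest 0)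
    else pvBScan rest 0

def contains_actual_newline_py_alt (content : String) : Bool :=
  pvBScan content.toList 0

-- ===== PRECONDITION & SPEC =====
def Spec_contains_actual_newline_py (content : String) (out : Bool) : Prop := out = contains_actual_newline_py_alt content
instance (content : String) (out : Bool) : Decidable (Spec_contains_actual_newline_py content out) := by unfold Spec_contains_actual_newline_py; infer_instance

-- ===== CLAIM (what is proved, stated in full; the proofs are below) =====
def Claim_equal_contains_actual_newline_py : Prop := ∀ (content : String), Dom_contains_actual_newline_py content → Spec_contains_actual_newline_py content (contains_actual_newline_py content)

-- ===== LEMMAS AND PROOFS =====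

-- forward count of consecutive trailing backslashes (the state B's scan carries)
def pvTbk : List Char → Nat → Nat
  | [], k => k
  | c :: u, k => pvTbk u (if c = '\\' then k + 1 else 0)

theorem pvTbk_append_singleton (u : List Char) (k : Nat) (c : Char) :
    pvTbk (u ++ [c]) k = if c = '\\' then pvTbk u k + 1 else 0 := by
  induction u generalizing k with
  | nil => rfl
  | cons a u ih => simp [pvTbk, ih]

theorem pvBScan_no_newline (u : List Char) (k : Nat) (hu : '\n' ∉ u) :
    pvBScan u k = false := by
  induction u generalizing k with
  | nil => rfl
  | cons a u ih =>
    simp only [List.mem_cons, not_or] at hu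
    have ha : a ≠ '\n' := fun h => hu.1 h.symm
    simp only [pvBScan, if_neg ha]
    split_ifs <;> exact ih _ hu.2

theorem pvBScan_split (u v : List Char) (k : Nat) (hu : '\n' ∉ u) :
    pvBScan (u ++ '\n' :: v) k = if pvTbk u k % 2 = 0 then true else pvBScan v 0 := by
  induction u generalizing k with
  | nil =>
    simp only [List.nil_append, pvBScan, pvTbk]
    split_ifs <;> simp_all
  | cons a u ih =>
    simp only [List.mem_cons, not_or] at hu
    simp only [List.cons_append, pvBScan, pvTbk]
    have ha : a ≠ '\n' := fun h => hu.1 h.symm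
    by_cases h1 : a = '\\'
    · simp only [if_pos h1, ih _ hu.2]
    · simp only [if_neg h1, if_neg ha, ih _ hu.2]

theorem pvCountBack_append (rest cs : List Char) (j : Nat) (hj : j ≤ cs.length) :
    pvCountBack (cs ++ rest) j = pvCountBack cs j := by
  induction j with
  | zero => rfl
  | succ p ih =>
    simp only [pvCountBack, PySem.List.pyGetD_natCast]
    rw [List.getD_append _ _ _ _ (by omega), ih (by omega)]

theorem pvCountBack_eq_tbk (u w : List Char) (hw : w.getLast? ≠ some '\\') :
    pvCountBack (w ++ u) (w.length + u.length) = pvTbk u 0 := by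
  induction u using List.reverseRecOn with
  | nil =>
    cases w using List.reverseRecOn with
    | nil => rfl
    | append_singleton w' c =>
      have hc : c ≠ '\\' := by simpa using hw
      simp only [List.append_nil, List.length_append, List.length_cons, List.length_nil,
        Nat.add_zero, pvCountBack, PySem.List.pyGetD_natCast]
      have hgc : (w' ++ [c]).getD w'.length ' ' = c := by
        rw [List.getD_eq_getElem _ _ (by simp)]
        simp
      rw [hgc, if_neg hc]
      rfl
  | append_singleton u' c ih =>
    have h1 : w.length + (u' ++ [c]).length = (w.length + u'.length) + 1 := by
      simp only [List.length_append, List.length_cons, List.length_nil]; omega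
    rw [h1]
    simp only [pvCountBack, PySem.List.pyGetD_natCast]
    have hlen : w.length + u'.length < (w ++ (u' ++ [c])).length := by simp
    have hget : (w ++ (u' ++ [c])).getD (w.length + u'.length) ' ' = c := by
      rw [List.getD_eq_getElem?_getD]
      rw [show w ++ (u' ++ [c]) = (w ++ u') ++ [c] by simp]
      rw [show w.length + u'.length = (w ++ u').length by simp]
      simp
    rw [hget]
    rw [show w ++ (u' ++ [c]) = (w ++ u') ++ [c] by simp,
      pvCountBack_append [c] (w ++ u') _ (by simp)]
    rw [pvTbk_append_singleton]
    split_ifs with hc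
    · rw [ih]
    · rfl

theorem pv_singleton_infix (c : Char) (l : List Char) : [c] <:+: l ↔ c ∈ l := by
  constructor
  · rintro ⟨s, t, rfl⟩; simp
  · intro h
    obtain ⟨s, t, rfl⟩ := List.append_of_mem h
    exact ⟨s, t, by simp⟩

theorem pvALoop_eq (cs : List Char) (fuel pos : Nat) (hpos : pos ≤ cs.length)
    (hfuel : cs.length - pos + 1 ≤ fuel)
    (hw : (cs.take pos).getLast? ≠ some '\\') :
    pvALoop cs pos fuel = pvBScan (cs.drop pos) 0 := by
  induction fuel generalizing pos with
  | zero => omega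
  | succ f ih =>
    simp only [pvALoop]
    by_cases hlt : pos < cs.length
    · rw [if_pos hlt]
      rw [PySem.Chars.findFrom_natCast cs ['\n'] pos hpos]
      set d := cs.drop pos with hd
      by_cases hfind : PySem.Chars.find d ['\n'] = -1
      · rw [hfind]
        norm_num
        have hno : '\n' ∉ d := by
          have := (PySem.Chars.find_eq_neg_one_iff (s := d) (sub := ['\n'])).mp hfind
          rw [pv_singleton_infix] at this; exact this
        exact pvBScan_no_newline d 0 hno
      · simp only [if_neg hfind]  -- np = pos + find from here on
        have hm1 : (-1 : Int) ≤ PySem.Chars.find d ['\n'] := PySem.Chars.neg_one_le_find d ['\n']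
        have hfnn : 0 ≤ PySem.Chars.find d ['\n'] := by omega
        rw [if_neg (by omega)]
        set f0 : Nat := (PySem.Chars.find d ['\n']).toNat with hf0
        obtain ⟨hpre, hmin⟩ := PySem.Chars.find_spec (s := d) (sub := ['\n']) hfnn
        obtain ⟨t, ht⟩ := hpre
        have hf0lt : f0 < d.length := by
          by_contra hge
          rw [List.drop_eq_nil_of_le (by omega)] at ht
          simp at ht
        have hdf : d.drop f0 = '\n' :: t := by
          rw [hf0]; exact ht.symm
        have h2 : d.drop (f0 + 1) = t := by
          have h3 := congrArg (List.drop 1) hdf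
          rw [List.drop_drop] at h3
          simpa [Nat.add_comm] using h3
        have hdcomp : d = d.take f0 ++ '\n' :: d.drop (f0 + 1) := by
          rw [h2]
          conv_lhs => rw [← List.take_append_drop f0 d]
          rw [hdf]
        set u := d.take f0 with hu
        set v := d.drop (f0 + 1) with hv
        have hulen : u.length = f0 := by rw [hu]; simp; omega
        have hdlen : d.length = cs.length - pos := by rw [hd]; simp
        have hnu : '\n' ∉ u := by
          intro hmem
          obtain ⟨i, hi, hgi⟩ := List.getElem_of_mem hmem
          have hile : i < f0 := by omega
          refine hmin i (by omega) ⟨List.drop (i + 1) d, ?_⟩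
          have hid : i < d.length := by omega
          have hgiq : d[i]? = some '\n' := by
            have h5 : u[i]? = some '\n' := by
              rw [List.getElem?_eq_getElem hi, hgi]
            rw [hu, List.getElem?_take_of_lt hile] at h5
            exact h5
          have hdi : d[i] = '\n' := by
            have h6 := List.getElem?_eq_getElem hid
            rw [hgiq] at h6
            exact (Option.some.inj h6).symm
          rw [List.drop_eq_getElem_cons hid, hdi]
          rfl
        have htklen : (cs.take pos).length = pos := by simp; omega
        have hcseq : cs = (cs.take pos ++ u) ++ '\n' :: v := by
          conv_lhs => rw [← List.take_append_drop pos cs, ← hd]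
          rw [hdcomp]; simp
        have hcb : pvCountBack cs (pos + f0) = pvTbk u 0 := by
          conv_lhs => rw [hcseq]
          rw [show pos + f0 = (cs.take pos ++ u).length by simp [htklen, hulen]]
          rw [pvCountBack_append ('\n' :: v) (cs.take pos ++ u) _ (le_refl _)]
          have := pvCountBack_eq_tbk u (cs.take pos) hw
          rw [htklen, hulen] at this
          rw [show (cs.take pos ++ u).length = pos + f0 by simp [htklen, hulen]]
          exact this
        have hnp : ((pos : Int) + PySem.Chars.find d ['\n']).toNat = pos + f0 := by omega
        have hbs : pvBScan (cs.drop pos) 0 =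
            if pvTbk u 0 % 2 = 0 then true else pvBScan v 0 := by
          rw [← hd]
          conv_lhs => rw [hdcomp]
          exact pvBScan_split u v 0 hnu
        by_cases hz : (pos : Int) + PySem.Chars.find d ['\n'] = 0
        · rw [if_pos hz]
          have hu0 : u = [] := by
            apply List.eq_nil_of_length_eq_zero
            rw [hulen]; omega
          rw [hbs, hu0]
          simp [pvTbk]
        · rw [if_neg hz, hnp, hcb, hbs]
          by_cases hev : pvTbk u 0 % 2 = 0
          · rw [if_pos hev, if_pos hev]
          · rw [if_neg hev, if_neg hev]
            have hlt2 : pos + f0 < cs.length := by omega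
            have hdg : d[f0]? = some '\n' := by
              conv_lhs => rw [hdcomp]
              rw [List.getElem?_append_right (by omega)]
              simp [hulen]
            have hcg : cs[pos + f0]? = some '\n' := by
              have h4 := hdg
              rw [hd, List.getElem?_drop] at h4
              exact h4
            have hlast : (cs.take (pos + f0 + 1)).getLast? = some '\n' := by
              rw [List.getLast?_eq_getElem?]
              have hlen2 : (cs.take (pos + f0 + 1)).length = pos + f0 + 1 := by
                simp; omega
              rw [hlen2]
              simp only [Nat.add_sub_cancel]
              rw [List.getElem?_take_of_lt (by omega)]
              exact hcg
            have hveq : cs.drop (pos + f0 + 1) = v := by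
              rw [hv, hd, List.drop_drop, Nat.add_assoc]
            rw [ih (pos + f0 + 1) (by omega) (by omega) (by rw [hlast]; simp), hveq]
    · rw [if_neg hlt]
      have hpe : pos = cs.length := by omega
      rw [hpe, List.drop_length]
      rfl

-- ===== VERDICT (by name: the statement is the Claim_ definition above) =====
theorem contains_actual_newline_py_spec : Claim_equal_contains_actual_newline_py := by
  intro content _
  unfold Spec_contains_actual_newline_py contains_actual_newline_py contains_actual_newline_py_alt
  by_cases hin : PySem.Str.isIn "\n" content = true
  · have hin' : PySem.Chars.isIn ['\n'] content.toList = true := by simpa using hin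
    rw [if_neg (by simp [hin'])]
    exact pvALoop_eq content.toList (content.toList.length + 1) 0 (by omega) (by omega) (by simp)
  · have hin' : PySem.Chars.isIn ['\n'] content.toList = false := by simpa using hin
    rw [if_pos (by simp [hin'])]
    have hno : '\n' ∉ content.toList := by
      have h7 := (PySem.Chars.isIn_eq_false_iff _ _).mp hin'
      intro hmem
      exact h7 ((pv_singleton_infix '\n' content.toList).mpr hmem)
    exact (pvBScan_no_newline _ 0 hno).symm
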